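-- pv_equiv track=rewrite | github.com/Penta/MyAnimeBot | myanimebot/utils.py | truncate_end_show
-- ===== SOURCE A (Python) =====
-- def truncate_end_show(media_name : str):
--     '''Check if a show's name ends with a show type and truncate it'''
--
--     if media_name is None: return None
--
--     show_types = (
--         '- TV',
--         '- Movie',
--         '- Special',
--         '- OVA',
--         '- ONA',
--         '- Manga',
--         '- Manhua',
--         '- Manhwa',
--         '- Novel',
--         '- One-Shot',
--         '- Doujinshi',
--         '- Music',
--         '- OEL',
--         '- Unknown',
--         '- Light Novel'
--     )
--
--     for show_type in show_types:
--         if media_name.endswith(show_type):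
--             new_show = media_name[:-len(show_type)]
--             # Check if space at the end
--             if new_show.endswith(' '):
--                 new_show = new_show[:-1]
--             return new_show
--     return media_name
-- ===== SOURCE B (Python) =====
-- _SHOW_TYPES = frozenset((
--     'TV', 'Movie', 'Special', 'OVA', 'ONA', 'Manga', 'Manhua', 'Manhwa',
--     'Novel', 'One-Shot', 'Doujinshi', 'Music', 'OEL', 'Unknown', 'Light Novel'
-- ))
--
-- def truncate_end_show(media_name: str):
--     '''Check if a show's name ends with a show type and truncate it'''
--     if media_name is None:
--         return None
--     head, sep, tail = media_name.rpartition('- ')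
--     if sep and tail in _SHOW_TYPES:
--         return head[:-1] if head.endswith(' ') else head
--     return media_name
-- ===== Notes on version B (the rewrite author's own statement) =====
-- stated objective: idiomatic
-- what changed: B replaces A's ordered scan over 15 per-suffix endswith checks by a single str.rpartition on the dash-space separator followed by one frozenset lookup of the tail (valid because no media-type name itself contains the separator, so the last separator pinpoints the only possible matching suffix).
import Mathlib
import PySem

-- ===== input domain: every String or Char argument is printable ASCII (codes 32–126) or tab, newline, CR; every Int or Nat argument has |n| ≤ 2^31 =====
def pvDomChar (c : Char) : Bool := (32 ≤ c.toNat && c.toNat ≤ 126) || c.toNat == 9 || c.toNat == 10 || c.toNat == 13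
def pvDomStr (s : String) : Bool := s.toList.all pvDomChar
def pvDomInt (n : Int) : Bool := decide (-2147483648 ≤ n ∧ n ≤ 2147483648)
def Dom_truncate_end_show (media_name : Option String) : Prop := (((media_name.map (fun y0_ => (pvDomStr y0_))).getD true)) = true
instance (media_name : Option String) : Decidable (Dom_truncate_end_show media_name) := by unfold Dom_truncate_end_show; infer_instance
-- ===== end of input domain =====

-- B replaces A's per-suffix endswith scan by one rpartition on '- ' plus a set lookup of the tail (objective: idiomatic).
-- Python str values are ported as their code-point lists (PySem.Chars; exact).

-- ===== PORT A =====
def pvShowTypesA : List (List Char) :=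
  ["- TV".toList, "- Movie".toList, "- Special".toList, "- OVA".toList, "- ONA".toList,
   "- Manga".toList, "- Manhua".toList, "- Manhwa".toList, "- Novel".toList, "- One-Shot".toList,
   "- Doujinshi".toList, "- Music".toList, "- OEL".toList, "- Unknown".toList, "- Light Novel".toList]

-- the 'for show_type in show_types' loop: first suffix match wins, else fall through
def pvLoopA (s : List Char) : List (List Char) → List Char
  | [] => s
  | show_type :: rest =>
    if PySem.Chars.endswith s show_type then
      -- new_show = media_name[:-len(show_type)], inlined at each of its uses
      if PySem.Chars.endswith (PySem.List.slice s none (some (-(show_type.length : Int)))) [' ']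
      then PySem.List.slice (PySem.List.slice s none (some (-(show_type.length : Int)))) none (some (-1))
      else PySem.List.slice s none (some (-(show_type.length : Int)))
    else pvLoopA s rest

def truncate_end_show (media_name : Option String) : Option String :=
  match media_name with
  | none => none
  | some s => some (String.ofList (pvLoopA s.toList pvShowTypesA))

-- ===== PORT B =====
def pvShowTypesB : PySem.Set (List Char) :=
  PySem.Set.ofList
    ["TV".toList, "Movie".toList, "Special".toList, "OVA".toList, "ONA".toList,
     "Manga".toList, "Manhua".toList, "Manhwa".toList, "Novel".toList, "One-Shot".toList,
     "Doujinshi".toList, "Music".toList, "OEL".toList, "Unknown".toList, "Light Novel".toList]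

-- hand port of str.rpartition('- ') (no PySem primitive; exact): some (head, tail) splits at the
-- LAST occurrence of '- '; none means the separator is absent (Python's ('', '', s) case).
def pvRPartition : List Char → Option (List Char × List Char)
  | [] => none
  | c :: rest =>
    match pvRPartition rest with
    | some (h, t) => some (c :: h, t)
    | none =>
      if c = '-' ∧ rest.head? = some ' ' then some ([], rest.tail) else none

def truncate_end_show_alt (media_name : Option String) : Option String :=
  match media_name with
  | none => none
  | some s =>
    match pvRPartition s.toList with
    | some (head, tail) =>
      if pvShowTypesB.contains tail then
        some (String.ofList (if PySem.Chars.endswith head [' ']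
                             then PySem.List.slice head none (some (-1)) else head))
      else some s
    | none => some s

-- ===== PRECONDITION & SPEC =====
def Spec_truncate_end_show (media_name : Option String) (out : Option String) : Prop := out = truncate_end_show_alt media_name
instance (media_name : Option String) (out : Option String) : Decidable (Spec_truncate_end_show media_name out) := by unfold Spec_truncate_end_show; infer_instance

-- ===== CLAIM (what is proved, stated in full; the proofs are below) =====
def Claim_equal_truncate_end_show : Prop := ∀ (media_name : Option String), Dom_truncate_end_show media_name → Spec_truncate_end_show media_name (truncate_end_show media_name)

-- ===== LEMMAS AND PROOFS =====

-- B's branch structure as a function of the character list (proof helper)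
def pvBCore (s : List Char) : List Char :=
  match pvRPartition s with
  | some (h, t) =>
    if pvShowTypesB.contains t then
      (if PySem.Chars.endswith h [' '] then PySem.List.slice h none (some (-1)) else h)
    else s
  | none => s

-- any list containing '- ' is split by pvRPartition
lemma pvRPartition_ne_none (w t : List Char) : pvRPartition (w ++ '-' :: ' ' :: t) ≠ none := by
  induction w with
  | nil =>
    rw [List.nil_append, pvRPartition]
    cases h2 : pvRPartition (' ' :: t) with
    | some p => simp
    | none =>
      split_ifs with hc
      · simp
      · exact absurd ⟨rfl, rfl⟩ hc
  | cons c w ih =>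
    rw [List.cons_append, pvRPartition]
    cases h2 : pvRPartition (w ++ '-' :: ' ' :: t) with
    | some p => simp
    | none => exact absurd h2 ih

lemma pvRPartition_cons_none {c : Char} {rest : List Char}
    (h : pvRPartition (c :: rest) = none) : pvRPartition rest = none := by
  cases hr : pvRPartition rest with
  | none => rfl
  | some p => rw [pvRPartition, hr] at h; simp at h

lemma pvRPartition_some {s h t : List Char} (hr : pvRPartition s = some (h, t)) :
    s = h ++ '-' :: ' ' :: t ∧ pvRPartition t = none := by
  induction s generalizing h t with
  | nil => simp [pvRPartition] at hr
  | cons c rest ih =>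
    rw [pvRPartition] at hr
    cases hrest : pvRPartition rest with
    | some p =>
      obtain ⟨h', t'⟩ := p
      rw [hrest] at hr
      simp only [Option.some.injEq, Prod.mk.injEq] at hr
      obtain ⟨hh, htt⟩ := hr
      subst hh htt
      obtain ⟨hs', hn⟩ := ih hrest
      exact ⟨by rw [hs']; simp, hn⟩
    | none =>
      rw [hrest] at hr
      split_ifs at hr with hc
      · obtain ⟨hcd, hhd⟩ := hc
        simp only [Option.some.injEq, Prod.mk.injEq] at hr
        obtain ⟨rfl, rfl⟩ := hr
        cases rest with
        | nil => simp at hhd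
        | cons d rest' =>
          simp only [List.head?_cons, Option.some.injEq] at hhd
          subst hcd hhd
          exact ⟨rfl, pvRPartition_cons_none hrest⟩

-- at most one suffix of the form '- X' with X free of '- ' can end a given string
lemma pvTailSuffixCase {t t' : List Char} (hs : ('-' :: ' ' :: t') <:+ ('-' :: ' ' :: t))
    (ht : pvRPartition t = none) : t' = t := by
  obtain ⟨u, hu⟩ := hs
  match u, hu with
  | [], hu => simpa using hu
  | [x], hu =>
    simp only [List.cons_append, List.nil_append, List.cons.injEq] at hu
    exact absurd hu.2.1 (by decide)
  | x :: y :: u'', hu =>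
    simp only [List.cons_append, List.cons.injEq] at hu
    exact absurd ht (by rw [← hu.2.2]; exact pvRPartition_ne_none u'' t')

lemma pvTailUnique {s t t' : List Char} (h : ('-' :: ' ' :: t) <:+ s) (h' : ('-' :: ' ' :: t') <:+ s)
    (ht : pvRPartition t = none) (ht' : pvRPartition t' = none) : t' = t := by
  rcases List.suffix_or_suffix_of_suffix h' h with hs | hs
  · exact pvTailSuffixCase hs ht
  · obtain ⟨u, hu⟩ := hs
    match u, hu with
    | [], hu => simpa using hu.symm
    | [x], hu =>
      simp only [List.cons_append, List.nil_append, List.cons.injEq] at hu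
      exact absurd hu.2.1 (by decide)
    | x :: y :: u'', hu =>
      simp only [List.cons_append, List.cons.injEq] at hu
      exact absurd ht' (by rw [← hu.2.2]; exact pvRPartition_ne_none u'' t)

lemma pvLoopA_no_match {s : List Char} {types : List (List Char)}
    (h : ∀ st ∈ types, PySem.Chars.endswith s st = false) : pvLoopA s types = s := by
  induction types with
  | nil => rfl
  | cons st rest ih =>
    rw [pvLoopA, h st (by simp)]
    simp only [Bool.false_eq_true, if_false]
    exact ih fun st' hm => h st' (by simp [hm])

lemma pvLoopA_match {s : List Char} {types : List (List Char)} {st : List Char}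
    (hmem : st ∈ types) (hm : PySem.Chars.endswith s st = true)
    (huniq : ∀ st' ∈ types, PySem.Chars.endswith s st' = true → st' = st) :
    pvLoopA s types =
      (if PySem.Chars.endswith (PySem.List.slice s none (some (-(st.length : Int)))) [' ']
       then PySem.List.slice (PySem.List.slice s none (some (-(st.length : Int)))) none (some (-1))
       else PySem.List.slice s none (some (-(st.length : Int)))) := by
  induction types with
  | nil => simp at hmem
  | cons st0 rest ih =>
    by_cases h0 : PySem.Chars.endswith s st0 = true
    · have he : st0 = st := huniq st0 (by simp) h0
      subst he
      rw [pvLoopA, if_pos h0]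
    · rw [pvLoopA, Bool.eq_false_iff.mpr h0]
      simp only [Bool.false_eq_true, if_false]
      have hmem' : st ∈ rest := by
        cases hmem with
        | head => exact absurd hm h0
        | tail _ hmm => exact hmm
      exact ih hmem' fun st' hm' he => huniq st' (by simp [hm']) he

-- every element of B's set names an element of A's suffix list and contains no '- '
lemma pvTypesB_fact {t : List Char} (hc : pvShowTypesB.contains t = true) :
    ('-' :: ' ' :: t) ∈ pvShowTypesA ∧ pvRPartition t = none := by
  have hmem : t ∈ ["TV".toList, "Movie".toList, "Special".toList, "OVA".toList, "ONA".toList,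
     "Manga".toList, "Manhua".toList, "Manhwa".toList, "Novel".toList, "One-Shot".toList,
     "Doujinshi".toList, "Music".toList, "OEL".toList, "Unknown".toList, "Light Novel".toList] :=
    (PySem.Set.mem_ofList _ _).mp ((PySem.Set.contains_iff _ _).mp hc)
  fin_cases hmem <;> exact ⟨by decide, by decide⟩

-- conversely, each element of A's list is '- ' ++ (a member of B's set)
lemma pvTypesA_fact {st : List Char} (hmem : st ∈ pvShowTypesA) :
    ∃ t, st = '-' :: ' ' :: t ∧ pvRPartition t = none ∧ pvShowTypesB.contains t = true := by
  fin_cases hmem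
  · exact ⟨"TV".toList, by decide, by decide, by decide⟩
  · exact ⟨"Movie".toList, by decide, by decide, by decide⟩
  · exact ⟨"Special".toList, by decide, by decide, by decide⟩
  · exact ⟨"OVA".toList, by decide, by decide, by decide⟩
  · exact ⟨"ONA".toList, by decide, by decide, by decide⟩
  · exact ⟨"Manga".toList, by decide, by decide, by decide⟩
  · exact ⟨"Manhua".toList, by decide, by decide, by decide⟩
  · exact ⟨"Manhwa".toList, by decide, by decide, by decide⟩
  · exact ⟨"Novel".toList, by decide, by decide, by decide⟩
  · exact ⟨"One-Shot".toList, by decide, by decide, by decide⟩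
  · exact ⟨"Doujinshi".toList, by decide, by decide, by decide⟩
  · exact ⟨"Music".toList, by decide, by decide, by decide⟩
  · exact ⟨"OEL".toList, by decide, by decide, by decide⟩
  · exact ⟨"Unknown".toList, by decide, by decide, by decide⟩
  · exact ⟨"Light Novel".toList, by decide, by decide, by decide⟩

-- core equivalence on the character list
lemma pvCore (s : List Char) : pvLoopA s pvShowTypesA = pvBCore s := by
  cases hr : pvRPartition s with
  | none =>
    rw [pvBCore]
    simp only [hr]
    apply pvLoopA_no_match
    intro st hmem
    obtain ⟨t, rfl, ht, hc⟩ := pvTypesA_fact hmem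
    by_contra hend
    obtain ⟨u, hu⟩ := (PySem.Chars.endswith_iff s _).mp (Bool.not_eq_false _ ▸ hend)
    exact pvRPartition_ne_none u t (hu ▸ hr)
  | some p =>
    obtain ⟨h, t⟩ := p
    obtain ⟨hs, ht⟩ := pvRPartition_some hr
    rw [pvBCore]
    simp only [hr]
    by_cases hc : pvShowTypesB.contains t = true
    · obtain ⟨hmemA, _⟩ := pvTypesB_fact hc
      have hm : PySem.Chars.endswith s ('-' :: ' ' :: t) = true :=
        (PySem.Chars.endswith_iff s _).mpr ⟨h, hs.symm⟩
      have huniq : ∀ st' ∈ pvShowTypesA, PySem.Chars.endswith s st' = true → st' = '-' :: ' ' :: t := by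
        intro st' hmem' hend'
        obtain ⟨t', rfl, ht', hc'⟩ := pvTypesA_fact hmem'
        rw [pvTailUnique ⟨h, hs.symm⟩ ((PySem.Chars.endswith_iff s _).mp hend') ht ht']
      rw [pvLoopA_match hmemA hm huniq]
      have hslice : PySem.List.slice s none (some (-((('-' :: ' ' :: t).length : Nat) : Int))) = h := by
        rw [PySem.List.slice_to_neg_natCast s _ (by simp)]
        rw [hs, List.length_append]
        simp only [List.length_cons]
        have h2 : h.length + (t.length + 1 + 1) - (t.length + 1 + 1) = h.length := by omega
        rw [h2, List.take_left]
      rw [hslice, if_pos hc]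
    · have hnone : ∀ st ∈ pvShowTypesA, PySem.Chars.endswith s st = false := by
        intro st hmem
        obtain ⟨t', rfl, ht', hc'⟩ := pvTypesA_fact hmem
        by_contra hend
        have hsuf : ('-' :: ' ' :: t') <:+ s :=
          (PySem.Chars.endswith_iff s _).mp (Bool.not_eq_false _ ▸ hend)
        exact hc ((pvTailUnique ⟨h, hs.symm⟩ hsuf ht ht') ▸ hc')
      rw [pvLoopA_no_match hnone, if_neg hc]

-- ===== VERDICT (by name: the statement is the Claim_ definition above) =====
theorem truncate_end_show_spec : Claim_equal_truncate_end_show := by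
  intro media_name _
  unfold Spec_truncate_end_show
  cases media_name with
  | none => rfl
  | some s =>
    show some (String.ofList (pvLoopA s.toList pvShowTypesA)) = _
    rw [pvCore s.toList, pvBCore]
    unfold truncate_end_show_alt
    cases hr : pvRPartition s.toList with
    | none => simp [hr, String.ofList_toList]
    | some p =>
      obtain ⟨h, t⟩ := p
      by_cases hc : pvShowTypesB.contains t = true
      · have hm := (PySem.Set.contains_iff _ _).mp hc
        simp [hr, hm]
      · have hm : t ∉ pvShowTypesB := fun m => by
          rw [(PySem.Set.contains_iff _ _).mpr m] at hc; exact hc rfl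
        simp [hr, hm, String.ofList_toList]
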